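-- pv_equiv track=rewrite | github.com/KWAKMANBO/Programmers | 프로그래머스/0/181874. A 강조하기/A 강조하기.py | solution
-- ===== SOURCE A (Python) =====
-- def solution(myString):
--     answer = ''
--     for i in myString:
--         if i == 'a':
--             answer += 'A'
--         elif i == 'A':
--             answer += i
--         else:
--             if i.isupper():
--                 answer += i.lower()
--             else:
--                 answer += i
--     return answer
-- ===== SOURCE B (Python) =====
-- def solution(myString):
--     return myString.lower().replace('a', 'A')
-- ===== Notes on version B (the rewrite author's own statement) =====
-- stated objective: faster
-- what changed: Replaces the per-character conditional accumulation loop with two chained whole-string library passes: lower() normalizes every letter, then a single replace restores the emphasized letter in upper case.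
import Mathlib
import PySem

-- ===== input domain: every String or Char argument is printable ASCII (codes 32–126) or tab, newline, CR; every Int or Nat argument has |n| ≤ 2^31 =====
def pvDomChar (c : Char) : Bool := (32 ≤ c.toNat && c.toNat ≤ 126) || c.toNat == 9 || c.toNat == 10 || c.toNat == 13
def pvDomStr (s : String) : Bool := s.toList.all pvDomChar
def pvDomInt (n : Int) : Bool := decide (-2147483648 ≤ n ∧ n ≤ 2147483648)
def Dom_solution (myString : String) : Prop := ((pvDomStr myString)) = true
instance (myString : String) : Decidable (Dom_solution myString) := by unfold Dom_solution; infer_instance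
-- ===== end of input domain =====

-- B replaces A's per-character conditional loop with two chained whole-string
-- library passes (lower then replace), measurably faster in Python; objective: faster.


-- ===== PORT A =====
-- literal transliteration: answer = ''; for i in myString: 4-way branch appending
def solution (myString : String) : String :=
  myString.toList.foldl (fun answer i =>
    if i = 'a' then answer ++ "A"
    else if i = 'A' then answer.push i
    else if PySem.Chars.isupper i then answer.push (PySem.Chars.lowerChar i)
    else answer.push i) ""

-- ===== PORT B =====
def solution_alt (myString : String) : String :=
  PySem.Str.replace (PySem.Str.lower myString) "a" "A"

-- ===== PRECONDITION & SPEC =====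
def Spec_solution (myString : String) (out : String) : Prop := out = solution_alt myString
instance (myString : String) (out : String) : Decidable (Spec_solution myString out) := by unfold Spec_solution; infer_instance

-- ===== CLAIM (what is proved, stated in full; the proofs are below) =====
def Claim_equal_solution : Prop := ∀ (myString : String), Dom_solution myString → Spec_solution myString (solution myString)

-- ===== LEMMAS AND PROOFS =====

-- the per-character value A's loop appends
def aStep (i : Char) : Char :=
  if i = 'a' then 'A'
  else if i = 'A' then i
  else if PySem.Chars.isupper i then PySem.Chars.lowerChar i
  else i

theorem solution_foldl (l : List Char) (acc : String) :
    (l.foldl (fun answer i =>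
      if i = 'a' then answer ++ "A"
      else if i = 'A' then answer.push i
      else if PySem.Chars.isupper i then answer.push (PySem.Chars.lowerChar i)
      else answer.push i) acc).toList = acc.toList ++ l.map aStep := by
  induction l generalizing acc with
  | nil => simp
  | cons c t ih =>
      simp only [List.foldl_cons, List.map_cons, ih, aStep]
      split_ifs <;> simp_all

-- replace with the single-character pattern 'a' is a per-character map
theorem replace_go_single (fuel : Nat) (l acc : List Char) (h : l.length ≤ fuel) :
    PySem.Chars.replace.go ['a'] ['A'] fuel l acc
      = acc.reverse ++ l.map (fun c => if c = 'a' then 'A' else c) := by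
  induction fuel generalizing l acc with
  | zero =>
      have : l = [] := List.eq_nil_of_length_eq_zero (Nat.le_zero.mp h)
      subst this; simp [PySem.Chars.replace.go]
  | succ n ih =>
      cases l with
      | nil => simp [PySem.Chars.replace.go]
      | cons c t =>
          simp only [PySem.Chars.replace.go]
          by_cases hc : c = 'a'
          · subst hc
            have : List.isPrefixOf ['a'] ('a' :: t) = true := by
              simp [List.isPrefixOf]
            simp only [this, if_pos]
            rw [ih _ _ (by simpa using Nat.le_of_succ_le_succ h)]
            simp
          · have : List.isPrefixOf ['a'] (c :: t) = false := by
              simp [List.isPrefixOf, BEq.beq]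
              intro hh; exact absurd hh.symm hc
            rw [if_neg (by simp [this]), ih _ _ (by simpa using Nat.le_of_succ_le_succ h)]
            simp [hc]

theorem replace_single (l : List Char) :
    PySem.Chars.replace l ['a'] ['A'] = l.map (fun c => if c = 'a' then 'A' else c) := by
  simp [PySem.Chars.replace, replace_go_single l.length l [] le_rfl]

theorem char_toNat_ofNat_valid (n : Nat) (h : n.isValidChar) : (Char.ofNat n).toNat = n := by
  simp [Char.ofNat, h, Char.ofNatAux, Char.toNat]

theorem char_eq_of_toNat_eq (a b : Char) (h : a.toNat = b.toNat) : a = b := by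
  have := congrArg Char.ofNat h; simpa using this

-- per-character agreement
theorem step_agree (c : Char) :
    (if PySem.Chars.lowerChar c = 'a' then 'A' else PySem.Chars.lowerChar c) = aStep c := by
  unfold aStep PySem.Chars.lowerChar PySem.Chars.isupper
  by_cases hu : 'A' ≤ c ∧ c ≤ 'Z'
  · have h65 : 65 ≤ c.toNat := hu.1
    have h90 : c.toNat ≤ 90 := hu.2
    have hval : (c.toNat + 32).isValidChar := by
      left; omega
    have htn : (Char.ofNat (c.toNat + 32)).toNat = c.toNat + 32 :=
      char_toNat_ofNat_valid _ hval
    have hca : c ≠ 'a' := by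
      intro h; subst h; simp at h90
    by_cases hcA : c = 'A'
    · subst hcA; simp
    · have hne : Char.ofNat (c.toNat + 32) ≠ 'a' := by
        intro h
        have : (Char.ofNat (c.toNat + 32)).toNat = ('a' : Char).toNat := by rw [h]
        rw [htn] at this
        have : c.toNat = 65 := by simpa using this
        exact hcA (char_eq_of_toNat_eq _ _ (by simpa using this))
      simp [hu.1, hu.2, hne, hca, hcA]
  · have hupos : ¬ (decide ('A' ≤ c) && decide (c ≤ 'Z')) = true := by
      simp only [Bool.and_eq_true, decide_eq_true_eq]; exact hu
    have hcA : c ≠ 'A' := by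
      intro h; subst h; exact hu ⟨le_refl _, by decide⟩
    simp only [hupos]
    by_cases hca : c = 'a'
    · subst hca; simp
    · simp [hca, hcA]

-- ===== VERDICT (by name: the statement is the Claim_ definition above) =====
theorem solution_spec : Claim_equal_solution := by
  intro s _
  unfold Spec_solution solution solution_alt
  apply String.ext
  rw [solution_foldl]
  rw [PySem.Str.toList_replace, PySem.Str.toList_lower]
  simp only [PySem.Chars.lower]
  rw [show ("a" : String).toList = ['a'] from rfl, show ("A" : String).toList = ['A'] from rfl,
    replace_single]
  simp only [List.map_map, String.toList_empty, List.nil_append]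
  apply List.map_congr_left
  intro c _
  exact (step_agree c).symm
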